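-- pv_equiv track=rewrite | github.com/shuu-wasseo/habitmap-tty | main.py | rearr
-- ===== SOURCE A (Python) =====
-- def rearr(dic, habit1, habit2):
--     lis = []
--
--     for habit in dic:
--         lis.append(habit)
--
--     lis.remove(habit1)
--     ind = lis.index(habit2)
--     lis.insert(ind + 1, habit1)
--
--     return {habit : dic[habit] for habit in lis}
-- ===== SOURCE B (Python) =====
-- def rearr(dic, habit1, habit2):
--     lis = list(dic)
--     lis.remove(habit1)
--
--     result = {}
--     found = False
--     for h in lis:
--         result[h] = dic[h]
--         if h == habit2:
--             result[habit1] = dic[habit1]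
--             found = True
--
--     if not found:
--         raise ValueError(f"{habit2!r} is not in list")
--     return result
-- ===== Notes on version B (the rewrite author's own statement) =====
-- stated objective: simpler
-- what changed: Replaces A's remove/index/insert list surgery plus a second dict-comprehension pass with a single conditional traversal that builds the result dict directly, appending habit1's entry right after habit2's.
import Mathlib
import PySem

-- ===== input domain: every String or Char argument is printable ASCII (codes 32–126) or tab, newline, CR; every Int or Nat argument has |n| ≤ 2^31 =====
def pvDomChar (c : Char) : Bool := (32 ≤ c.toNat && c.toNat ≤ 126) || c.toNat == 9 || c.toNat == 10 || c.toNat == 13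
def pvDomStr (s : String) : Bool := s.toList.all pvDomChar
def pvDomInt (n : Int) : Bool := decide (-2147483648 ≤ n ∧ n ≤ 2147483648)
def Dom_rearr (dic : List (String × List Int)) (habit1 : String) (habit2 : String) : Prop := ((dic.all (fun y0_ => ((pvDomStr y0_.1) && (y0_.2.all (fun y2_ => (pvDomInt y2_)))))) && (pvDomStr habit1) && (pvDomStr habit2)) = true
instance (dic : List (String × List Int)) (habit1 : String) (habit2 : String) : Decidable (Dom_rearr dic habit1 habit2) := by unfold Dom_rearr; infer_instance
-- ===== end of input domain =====

-- B builds the reordered dict in one conditional traversal instead of A's remove/index/insert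
-- list surgery followed by a dict comprehension; objective: simpler, same O(n) cost.


-- ===== PORT A =====
-- lis = []; for habit in dic: lis.append(habit); lis.remove(habit1); ind = lis.index(habit2);
-- lis.insert(ind + 1, habit1); return {habit: dic[habit] for habit in lis}
def rearr (dic : List (String × List Int)) (habit1 : String) (habit2 : String) : List (String × List Int) :=
  let lis := dic.foldl (fun acc p => acc ++ [p.1]) []
  match PySem.List.remove? lis habit1 with
  | none => []  -- lis.remove raises ValueError (excluded by Pre_)
  | some lis =>
    match PySem.List.index? lis habit2 with
    | none => []  -- lis.index raises ValueError (excluded by Pre_)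
    | some ind =>
      let lis := PySem.List.insert lis ((ind : Int) + 1) habit1
      (lis.foldl (fun d h => d.insert h ((PySem.Dict.mk dic).getD h [])) PySem.Dict.empty).items

-- ===== PORT B =====
-- lis = list(dic); lis.remove(habit1); then one pass over lis copying entries,
-- inserting habit1's entry right after habit2's and setting `found`; raise if not found.
def rearr_alt (dic : List (String × List Int)) (habit1 : String) (habit2 : String) : List (String × List Int) :=
  let lis := dic.map Prod.fst
  match PySem.List.remove? lis habit1 with
  | none => []  -- lis.remove raises ValueError (excluded by Pre_)
  | some lis =>
    let st := lis.foldl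
      (fun (st : PySem.Dict String (List Int) × Bool) h =>
        let r := st.1.insert h ((PySem.Dict.mk dic).getD h [])
        if h == habit2 then (r.insert habit1 ((PySem.Dict.mk dic).getD habit1 []), true)
        else (r, st.2))
      (PySem.Dict.empty, false)
    if st.2 then st.1.items else []  -- raise ValueError when habit2 was never seen (excluded by Pre_)

-- ===== PRECONDITION & SPEC =====
-- Pre_ excludes (a) inputs where A raises ValueError: habit1 not a key, or habit2 not a key
-- distinct from habit1; and (b) association lists with duplicate keys, which do not represent
-- a Python dict (dict construction collapses them before A ever runs).
def Pre_rearr (dic : List (String × List Int)) (habit1 : String) (habit2 : String) : Prop :=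
  (dic.map Prod.fst).Nodup ∧ habit1 ∈ dic.map Prod.fst ∧ habit2 ∈ dic.map Prod.fst ∧ habit1 ≠ habit2
instance (dic : List (String × List Int)) (habit1 : String) (habit2 : String) : Decidable (Pre_rearr dic habit1 habit2) := by unfold Pre_rearr; infer_instance

def pvWitness_rearr : (List (String × List Int)) × String × String := ([("a", [1]), ("b", [2])], "a", "b")

def Spec_rearr (dic : List (String × List Int)) (habit1 : String) (habit2 : String) (out : List (String × List Int)) : Prop := out = rearr_alt dic habit1 habit2
instance (dic : List (String × List Int)) (habit1 : String) (habit2 : String) (out : List (String × List Int)) : Decidable (Spec_rearr dic habit1 habit2 out) := by unfold Spec_rearr; infer_instance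

-- ===== CLAIM (what is proved, stated in full; the proofs are below) =====
def Claim_equal_rearr : Prop := ∀ (dic : List (String × List Int)) (habit1 : String) (habit2 : String), Dom_rearr dic habit1 habit2 → Pre_rearr dic habit1 habit2 → Spec_rearr dic habit1 habit2 (rearr dic habit1 habit2)

-- ===== LEMMAS AND PROOFS =====

-- B's loop over a segment not containing habit2 just copies entries and keeps the flag.
theorem foldB_no_habit2 (dic : List (String × List Int)) (habit1 habit2 : String)
    (l : List String) (d : PySem.Dict String (List Int)) (b : Bool) (hl : habit2 ∉ l) :
    l.foldl
      (fun (st : PySem.Dict String (List Int) × Bool) h =>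
        if h == habit2 then
          ((st.1.insert h ((PySem.Dict.mk dic).getD h [])).insert habit1 ((PySem.Dict.mk dic).getD habit1 []), true)
        else (st.1.insert h ((PySem.Dict.mk dic).getD h []), st.2))
      (d, b)
    = (l.foldl (fun d h => d.insert h ((PySem.Dict.mk dic).getD h [])) d, b) := by
  induction l generalizing d with
  | nil => rfl
  | cons x xs ih =>
    simp only [List.mem_cons, not_or] at hl
    simp only [List.foldl_cons]
    rw [if_neg (by simpa using Ne.symm hl.1)]
    exact ih _ hl.2

theorem rearr_spec' (dic : List (String × List Int)) (habit1 habit2 : String)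
    (hpre : Pre_rearr dic habit1 habit2) :
    rearr dic habit1 habit2 = rearr_alt dic habit1 habit2 := by
  obtain ⟨hnd, h1mem, h2mem, hne⟩ := hpre
  have h2e : habit2 ∈ (dic.map Prod.fst).erase habit1 :=
    (List.mem_erase_of_ne (Ne.symm hne)).mpr h2mem
  obtain ⟨ind, hind⟩ := Option.isSome_iff_exists.mp
    ((PySem.List.index?_isSome_iff _ _).mpr h2e)
  obtain ⟨pre, suf, heq, hlen, hpre2⟩ := (PySem.List.index?_eq_some_iff _ _ _).mp hind
  have h2suf : habit2 ∉ suf := by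
    have : ((dic.map Prod.fst).erase habit1).Nodup := hnd.erase habit1
    rw [heq] at this
    exact (List.nodup_cons.mp this.of_append_right).1
  -- A's inserted list is pre ++ habit2 :: habit1 :: suf
  have hins : PySem.List.insert ((dic.map Prod.fst).erase habit1) ((ind : Int) + 1) habit1
      = pre ++ habit2 :: habit1 :: suf := by
    have hle : ind + 1 ≤ ((dic.map Prod.fst).erase habit1).length := by
      rw [heq, List.length_append, List.length_cons]; omega
    have : ((ind : Int) + 1) = ((ind + 1 : Nat) : Int) := by push_cast; ring
    rw [this, PySem.List.insert_natCast _ _ _ hle, heq, ← hlen]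
    have ht : (pre ++ habit2 :: suf).take (pre.length + 1) = pre ++ [habit2] := by
      have := List.take_length_add_append (l₁ := pre) (l₂ := habit2 :: suf) 1
      simpa using this
    have hd : (pre ++ habit2 :: suf).drop (pre.length + 1) = suf := by
      have := List.drop_length_add_append (l₁ := pre) (l₂ := habit2 :: suf) 1
      simpa using this
    rw [ht, hd]; simp
  -- unfold both ports
  unfold rearr rearr_alt
  rw [PySem.List.foldl_append_singleton_eq_map]
  simp only [List.nil_append]
  rw [PySem.List.remove?_eq_some_erase _ _ h1mem]
  simp only
  rw [hind]
  simp only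
  rw [hins, heq]
  -- B's fold over pre ++ habit2 :: suf, split at habit2
  rw [List.foldl_append, List.foldl_append, foldB_no_habit2 dic habit1 habit2 pre _ false hpre2]
  simp only [List.foldl_cons]
  rw [if_pos (beq_self_eq_true habit2)]
  rw [foldB_no_habit2 dic habit1 habit2 suf _ true h2suf]
  simp

-- ===== VERDICT (by name: the statement is the Claim_ definition above) =====
theorem rearr_spec : Claim_equal_rearr := by
  intro dic habit1 habit2 _ hpre
  unfold Spec_rearr
  exact rearr_spec' dic habit1 habit2 hpre
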